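-- pv_equiv track=rewrite | github.com/ntmahn/NCKH-2023 | OPTIMIZE THE FUNDRAISING J OURNEY FOR THE ATM SYSTEM/Thuật toán/Genetic Algorithm.py | len_tour
-- ===== SOURCE A (Python) =====
-- import copy
--
-- number_of_trucks=2
--
-- def len_tour(route):
--     temp = copy.copy(route)
--     temp.insert(0,0)
--     temp.append(0)
--     index = []
--     array = []
--     for i in range(number_of_trucks):
--         array.append([])
--     for i in range(len(temp)):
--         if temp[i] == 0: index.append(i)
--     for i in range(number_of_trucks):
--         array[i] = index[i+1] - index[i] - 1
--     return array
-- ===== SOURCE B (Python) =====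
-- number_of_trucks = 2
--
-- def len_tour(route):
--     # One accumulating pass: collect run lengths between zeros, then take the
--     # first number_of_trucks of them (IndexError, as in A, if there are too few).
--     segs = []
--     count = 0
--     for x in route:
--         if x == 0:
--             segs.append(count)
--             count = 0
--         else:
--             count += 1
--     segs.append(count)
--     return [segs[i] for i in range(number_of_trucks)]
-- ===== Notes on version B (the rewrite author's own statement) =====
-- stated objective: simpler
-- what changed: B computes segment lengths in one accumulating pass over route (run-length counting reset at zeros) instead of building a padded copy, an index table of zero positions and differencing it.
import Mathlib
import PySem

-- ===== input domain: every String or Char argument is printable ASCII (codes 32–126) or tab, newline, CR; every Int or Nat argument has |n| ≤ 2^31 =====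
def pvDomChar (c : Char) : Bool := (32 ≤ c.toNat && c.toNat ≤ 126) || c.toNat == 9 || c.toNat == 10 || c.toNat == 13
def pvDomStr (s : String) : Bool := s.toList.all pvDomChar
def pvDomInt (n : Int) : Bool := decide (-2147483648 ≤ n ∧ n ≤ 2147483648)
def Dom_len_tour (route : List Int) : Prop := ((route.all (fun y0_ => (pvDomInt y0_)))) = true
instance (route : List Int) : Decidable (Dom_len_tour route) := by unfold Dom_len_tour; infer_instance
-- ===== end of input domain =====

-- B replaces A's padded copy + zero-index table + differencing by one accumulating
-- run-length pass; equal return values on every route containing a zero (Pre_).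

-- ===== PORT A =====
-- A: temp = [0] + route + [0]; index = zero positions of temp; array[i] = index[i+1]-index[i]-1.
-- temp[i] is always in range (i < len(temp)), so getD's default is never used;
-- index[i+1]/index[i] are in range whenever Pre_ holds (A raises IndexError otherwise).
def len_tour (route : List Int) : List Int :=
  let temp : List Int := 0 :: route ++ [0]
  let index : List Int :=
    (List.range temp.length).foldl
      (fun acc i => if temp.getD i 1 == 0 then acc ++ [Int.ofNat i] else acc) []
  (List.range 2).foldl
    (fun arr i => arr ++ [index.getD (i + 1) 0 - index.getD i 0 - 1]) []

-- ===== PORT B =====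
-- B: one pass keeping (segs, count); x == 0 flushes count, else increments it;
-- final count appended; then the first two segments (B raises IndexError outside Pre_).
def len_tour_alt (route : List Int) : List Int :=
  let res :=
    route.foldl
      (fun (st : List Int × Int) x =>
        if x == 0 then (st.1 ++ [st.2], 0) else (st.1, st.2 + 1))
      (([] : List Int), (0 : Int))
  let segs := res.1 ++ [res.2]
  (List.range 2).map (fun i => segs.getD i 0)

-- ===== PRECONDITION & SPEC =====
-- A (and B) raise IndexError exactly when route contains no zero; Pre_ excludes those.
def Pre_len_tour (route : List Int) : Prop := (0 : Int) ∈ route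
instance (route : List Int) : Decidable (Pre_len_tour route) := by unfold Pre_len_tour; infer_instance
def pvWitness_len_tour : List Int := [1, 2, 0, 3]

def Spec_len_tour (route : List Int) (out : List Int) : Prop := out = len_tour_alt route
instance (route : List Int) (out : List Int) : Decidable (Spec_len_tour route out) := by unfold Spec_len_tour; infer_instance

-- ===== CLAIM (what is proved, stated in full; the proofs are below) =====
def Claim_equal_len_tour : Prop := ∀ (route : List Int), Dom_len_tour route → Pre_len_tour route → Spec_len_tour route (len_tour route)

-- ===== LEMMAS AND PROOFS =====

-- zero positions (as Ints) of a list
def zpI : List Int → List Int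
  | [] => []
  | x :: xs => if x == 0 then 0 :: (zpI xs).map (· + 1) else (zpI xs).map (· + 1)

-- segments of l given a pending run of length c (pure recursion mirror of B's fold)
def segsF : List Int → Int → List Int
  | [], c => [c]
  | x :: xs, c => if x == 0 then c :: segsF xs 0 else segsF xs (c + 1)

-- positions of zeros determined by segment lengths, starting at `s`
def posOf : List Int → Int → List Int
  | [], _ => []
  | a :: rest, s => (s + a) :: posOf rest (s + a + 1)

theorem zpI_range_filter (l : List Int) :
    ((List.range l.length).filter (fun i => l.getD i 1 == 0)).map Int.ofNat = zpI l := by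
  induction l with
  | nil => simp [zpI]
  | cons x xs ih =>
    rw [List.length_cons, List.range_succ_eq_map, List.filter_cons, List.filter_map]
    have hc : ((fun i => (x :: xs).getD i 1 == 0) ∘ Nat.succ) = fun i => xs.getD i 1 == 0 := rfl
    rw [hc]
    have hm : (((List.range xs.length).filter (fun i => xs.getD i 1 == 0)).map Nat.succ).map Int.ofNat
        = (zpI xs).map (· + 1) := by
      rw [← ih, List.map_map, List.map_map]
      apply List.map_congr_left
      intro a _
      simp
    by_cases hx : x = 0
    · rw [if_pos (by simp [hx]), List.map_cons, zpI, if_pos (by simp [hx]), hm]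
      simp
    · rw [if_neg (by simp [hx]), zpI, if_neg (by simp [hx]), hm]

theorem posOf_map_add_one (segs : List Int) (s : Int) :
    (posOf segs s).map (· + 1) = posOf segs (s + 1) := by
  induction segs generalizing s with
  | nil => simp [posOf]
  | cons a rest ih =>
    simp [posOf, ih]
    constructor
    · ring
    · rw [show s + a + 1 + 1 = s + 1 + a + 1 by ring]

theorem zpI_append_zero (l : List Int) (c : Int) :
    zpI (l ++ [0]) = posOf (segsF l c) (-c) := by
  induction l generalizing c with
  | nil => simp [zpI, segsF, posOf]
  | cons x xs ih =>
    by_cases hx : x = 0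
    · simp [zpI, segsF, hx, posOf, ih 0, posOf_map_add_one]
    · rw [show ((x :: xs) ++ [0]) = x :: (xs ++ [0]) from rfl, zpI, if_neg (by simp [hx]),
        segsF, if_neg (by simp [hx]), ih (c + 1), posOf_map_add_one, show -(c + 1) + 1 = -c by ring]

theorem segsF_ne_nil (l : List Int) (c : Int) : segsF l c ≠ [] := by
  induction l generalizing c with
  | nil => simp [segsF]
  | cons x xs ih =>
    by_cases hx : x = 0
    · simp [segsF, hx]
    · simpa [segsF, hx] using ih (c + 1)

theorem segsF_two_le {l : List Int} (h : (0 : Int) ∈ l) :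
    ∃ s0 s1 t, ∀ c, segsF l c = (c + s0) :: s1 :: t := by
  induction l with
  | nil => simp at h
  | cons x xs ih =>
    by_cases hx : x = 0
    · subst hx
      refine ⟨0, (segsF xs 0).headI, (segsF xs 0).tail, fun c => ?_⟩
      have hne := segsF_ne_nil xs 0
      cases hh : segsF xs 0 with
      | nil => exact absurd hh hne
      | cons a b => simp [segsF, hh]
    · have hm : (0 : Int) ∈ xs := by
        rcases List.mem_cons.mp h with h1 | h1
        · exact absurd h1.symm hx
        · exact h1
      obtain ⟨s0, s1, t, hst⟩ := ih hm
      refine ⟨s0 + 1, s1, t, fun c => ?_⟩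
      have harith : c + 1 + s0 = c + (s0 + 1) := by ring
      simp [segsF, hx, hst (c + 1), harith]

theorem b_foldl (l : List Int) (acc : List Int) (c : Int) :
    (let r := l.foldl
      (fun (st : List Int × Int) x =>
        if x == 0 then (st.1 ++ [st.2], 0) else (st.1, st.2 + 1)) (acc, c)
     r.1 ++ [r.2]) = acc ++ segsF l c := by
  induction l generalizing acc c with
  | nil => simp [segsF]
  | cons x xs ih =>
    by_cases hx : x = 0
    · simpa [segsF, hx] using ih (acc ++ [c]) 0
    · simpa [segsF, hx] using ih acc (c + 1)

-- ===== VERDICT (by name: the statement is the Claim_ definition above) =====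
theorem len_tour_spec : Claim_equal_len_tour := by
  intro route _ hpre
  unfold Spec_len_tour len_tour len_tour_alt
  obtain ⟨s0, s1, t, hst⟩ := segsF_two_le hpre
  have hsegs := hst 0
  rw [zero_add] at hsegs
  have hB := b_foldl route [] 0
  simp only [List.nil_append] at hB
  have hidx : (List.range (0 :: route ++ [0]).length).foldl
      (fun acc i => if (0 :: route ++ [0] : List Int).getD i 1 == 0 then acc ++ [Int.ofNat i] else acc) []
      = zpI (0 :: route ++ [0]) := by
    rw [PySem.List.foldl_append_if (fun i => (0 :: route ++ [0] : List Int).getD i 1 == 0) Int.ofNat]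
    rw [List.nil_append]
    exact zpI_range_filter (0 :: route ++ [0])
  simp only [hidx]
  have hz : zpI ((0 : Int) :: route ++ [0]) = 0 :: posOf (segsF route 0) 1 := by
    show zpI ((0 : Int) :: (route ++ [0])) = _
    rw [zpI, if_pos (by simp), zpI_append_zero route 0, neg_zero, posOf_map_add_one, zero_add]
  rw [hz, hsegs, hB, hsegs]
  simp [posOf, List.range_succ, List.getD]
  omega
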